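-- pv_equiv track=rewrite | github.com/ietf-wg-mimi/draft-ietf-mimi-content | generate-examples.py | pretty_hex
-- ===== SOURCE A (Python) =====
-- def pretty_hex(hex_str, indent=0):
--     # takes a string of hex digits and returns an h'' EDN string
--     # with at most 32 hex digits per line/row, indented `indent` spaces
--     l = len(hex_str)
--     if l % 2 == 1:
--         raise Exception("Odd number of hex digits")
--     if l == 0:
--         return "h''"
--     # zero-indexed last row of hex chars
--     last_row = (l - 1) // 32
--     pretty = "h'"
--     for row in range(last_row + 1):
--         start = row*32
--         if row != last_row:
--             pretty += hex_str[start:start+32] + '\n' + ' '*(indent+2)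
--         else:
--             pretty += hex_str[start:] + "'"
--     return pretty
-- ===== SOURCE B (Python) =====
-- def pretty_hex(hex_str, indent=0):
--     # takes a string of hex digits and returns an h'' EDN string
--     # with at most 32 hex digits per line/row, indented `indent` spaces
--     if len(hex_str) % 2 == 1:
--         raise Exception("Odd number of hex digits")
--     out = "h'"
--     for i, c in enumerate(hex_str):
--         if i and i % 32 == 0:
--             out += '\n' + ' ' * (indent + 2)
--         out += c
--     return out + "'"
-- ===== Notes on version B (the rewrite author's own statement) =====
-- stated objective: simpler
-- what changed: B makes a single character-by-character pass over the string (enumerate) inserting the newline+indent separator before every 32nd character via a modular index test, eliminating A's row arithmetic ((l-1)//32), the 32-char slicing and the special last-row branch.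
import Mathlib
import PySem

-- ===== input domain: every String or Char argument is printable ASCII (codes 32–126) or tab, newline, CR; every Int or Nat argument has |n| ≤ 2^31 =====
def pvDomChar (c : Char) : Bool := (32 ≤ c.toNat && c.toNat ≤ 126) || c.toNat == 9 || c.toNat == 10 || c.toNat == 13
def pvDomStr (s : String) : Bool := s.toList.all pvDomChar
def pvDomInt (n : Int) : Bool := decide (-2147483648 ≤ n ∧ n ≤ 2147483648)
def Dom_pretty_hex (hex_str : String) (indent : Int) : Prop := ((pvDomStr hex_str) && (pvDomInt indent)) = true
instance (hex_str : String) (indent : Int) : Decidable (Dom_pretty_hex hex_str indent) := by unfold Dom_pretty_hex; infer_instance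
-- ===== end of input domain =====

-- B replaces A's row-counted slicing loop ((l-1)//32 rows, last-row branch) by a single
-- character-by-character pass: enumerate the string and insert the newline+indent separator
-- before every 32nd character via a modular index test; objective: simpler (same O(n) cost).


-- ===== PORT A =====
def pretty_hex (hex_str : String) (indent : Int) : String :=
  let cs := hex_str.toList
  let l : Int := PySem.Str.len hex_str
  if PySem.Int.mod l 2 = 1 then ""   -- Python: raise Exception("Odd number of hex digits"); excluded by Pre_
  else if l = 0 then "h''"
  else
    let last_row : Int := PySem.Int.floordiv (l - 1) 32
    let pretty := (PySem.List.pyRange 0 (last_row + 1) 1).foldl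
      (fun pretty row =>
        let start := row * 32
        if row ≠ last_row then
          pretty ++ PySem.List.slice cs (some start) (some (start + 32))
                 ++ '\n' :: PySem.List.pyRepeat [' '] (indent + 2)   -- '\n' + ' '*(indent+2)
        else
          pretty ++ PySem.List.slice cs (some start) none ++ ['\''])
      "h'".toList
    String.ofList pretty

-- ===== PORT B =====
def pretty_hex_alt (hex_str : String) (indent : Int) : String :=
  let cs := hex_str.toList
  if PySem.Int.mod (PySem.Str.len hex_str) 2 = 1 then ""   -- Python: raise, excluded by Pre_
  else
    let out := (PySem.List.enumerate cs 0).foldl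
      (fun out ic =>
        let out := if ic.1 ≠ 0 ∧ PySem.Int.mod ic.1 32 = 0 then
            out ++ '\n' :: PySem.List.pyRepeat [' '] (indent + 2)   -- '\n' + ' '*(indent+2)
          else out
        out ++ [ic.2])
      "h'".toList
    String.ofList (out ++ ['\''])

-- ===== PRECONDITION & SPEC =====
-- Pre_ excludes exactly the inputs where the Python A (and B alike) raises: an odd number of hex digits.
def Pre_pretty_hex (hex_str : String) (indent : Int) : Prop := hex_str.toList.length % 2 = 0
instance (hex_str : String) (indent : Int) : Decidable (Pre_pretty_hex hex_str indent) := by unfold Pre_pretty_hex; infer_instance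
def pvWitness_pretty_hex : String × Int := ("00112233445566778899aabbccddeeff0011", 4)

def Spec_pretty_hex (hex_str : String) (indent : Int) (out : String) : Prop := out = pretty_hex_alt hex_str indent
instance (hex_str : String) (indent : Int) (out : String) : Decidable (Spec_pretty_hex hex_str indent out) := by unfold Spec_pretty_hex; infer_instance

-- ===== CLAIM (what is proved, stated in full; the proofs are below) =====
def Claim_equal_pretty_hex : Prop := ∀ (hex_str : String) (indent : Int), Dom_pretty_hex hex_str indent → Pre_pretty_hex hex_str indent → Spec_pretty_hex hex_str indent (pretty_hex hex_str indent)

-- ===== LEMMAS AND PROOFS =====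

-- join with a nonempty tail peels the head chunk and one separator
lemma join_cons_of_ne_nil (sep a : List Char) (l : List (List Char)) (h : l ≠ []) :
    PySem.Chars.join sep (a :: l) = a ++ sep ++ PySem.Chars.join sep l := by
  cases l with
  | nil => exact absurd rfl h
  | cons b t => exact PySem.Chars.join_cons_cons sep a b t

-- B's character loop body (abbreviation used only by the proofs)
def pvBody (sep : List Char) (out : List Char) (ic : Int × Char) : List Char :=
  (if ic.1 ≠ 0 ∧ PySem.Int.mod ic.1 32 = 0 then out ++ sep else out) ++ [ic.2]

-- characters whose indices are never a positive multiple of 32 are appended plainly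
lemma plainFold (sep : List Char) :
    ∀ (ds : List Char) (b : Int) (acc : List Char),
    (∀ k : Nat, k < ds.length → ¬((b + (k : Int) ≠ 0) ∧ PySem.Int.mod (b + (k : Int)) 32 = 0)) →
    (PySem.List.enumerate ds b).foldl (pvBody sep) acc = acc ++ ds := by
  intro ds
  induction ds with
  | nil => intro b acc _; simp [PySem.List.enumerate_nil]
  | cons c t ih =>
    intro b acc h
    have h0 : ¬(b ≠ 0 ∧ PySem.Int.mod b 32 = 0) := by
      simpa using h 0 (by simp)
    have hstep : pvBody sep acc (b, c) = acc ++ [c] := by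
      show (if b ≠ 0 ∧ PySem.Int.mod b 32 = 0 then acc ++ sep else acc) ++ [c] = acc ++ [c]
      rw [if_neg h0]
    rw [PySem.List.enumerate_cons, List.foldl_cons, hstep,
        ih (b + 1) (acc ++ [c]) ?_]
    · simp
    · intro k hk
      have := h (k + 1) (by simpa using Nat.succ_lt_succ hk)
      simpa [add_assoc, add_comm, add_left_comm] using this

-- one chunk of at most 32 characters starting at index 32*j: the separator fires exactly
-- before the first character when j ≠ 0, then the chunk is appended plainly
lemma chunkFold1 (sep : List Char) (ds : List Char) (j : Nat) (acc : List Char)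
    (hne : ds ≠ []) (hle : ds.length ≤ 32) :
    (PySem.List.enumerate ds ((32 * j : Nat) : Int)).foldl (pvBody sep) acc
      = acc ++ (if j = 0 then ([] : List Char) else sep) ++ ds := by
  cases ds with
  | nil => exact absurd rfl hne
  | cons c t =>
    rw [PySem.List.enumerate_cons, List.foldl_cons]
    have hmod : PySem.Int.mod ((32 * j : Nat) : Int) 32 = 0 := by
      rw [PySem.Int.mod_eq_emod_of_pos (by norm_num)]
      omega
    have hplain : ∀ acc', (PySem.List.enumerate t (((32 * j : Nat) : Int) + 1)).foldl
        (pvBody sep) acc' = acc' ++ t := by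
      intro acc'
      apply plainFold
      intro k hk
      have hle' : t.length + 1 ≤ 32 := by simpa using hle
      rw [PySem.Int.mod_eq_emod_of_pos (by norm_num)]
      intro ⟨_, hm⟩
      omega
    by_cases hj : j = 0
    · subst hj
      have hstep : pvBody sep acc (((32 * 0 : Nat) : Int), c) = acc ++ [c] := by
        show (if ((32 * 0 : Nat) : Int) ≠ 0 ∧ PySem.Int.mod ((32 * 0 : Nat) : Int) 32 = 0
              then acc ++ sep else acc) ++ [c] = acc ++ [c]
        rw [if_neg (by simp)]
      rw [hstep, hplain]
      simp
    · have hstep : pvBody sep acc (((32 * j : Nat) : Int), c) = acc ++ sep ++ [c] := by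
        have hne0 : ((32 * j : Nat) : Int) ≠ 0 := by
          simpa using (by omega : ¬ (32 * j : Nat) = 0)
        show (if ((32 * j : Nat) : Int) ≠ 0 ∧ PySem.Int.mod ((32 * j : Nat) : Int) 32 = 0
              then acc ++ sep else acc) ++ [c] = acc ++ sep ++ [c]
        rw [if_pos ⟨hne0, hmod⟩]
      rw [hstep, hplain]
      simp [hj, List.append_assoc]

-- Core for B: the whole character pass over a nonempty string with m+1 chunks, starting at
-- chunk number j, produces (one leading separator unless j = 0, then) the separator-join of
-- the 32-character chunks.
lemma charFold (sep : List Char) :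
    ∀ (m : Nat) (cs : List Char) (j : Nat) (acc : List Char), cs ≠ [] →
    (cs.length - 1) / 32 = m →
    (PySem.List.enumerate cs ((32 * j : Nat) : Int)).foldl (pvBody sep) acc
      = acc ++ (if j = 0 then ([] : List Char) else sep)
          ++ PySem.Chars.join sep ((List.range (m + 1)).map (fun k => (cs.drop (32 * k)).take 32)) := by
  intro m
  induction m with
  | zero =>
    intro cs j acc hne hm
    have hpos : cs.length ≠ 0 := by simpa using hne
    have hle : cs.length ≤ 32 := by omega
    rw [chunkFold1 sep cs j acc hne hle]
    simp [List.range_one, PySem.Chars.join_singleton, List.take_of_length_le hle,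
      List.append_assoc]
  | succ m' ih =>
    intro cs j acc hne hm
    have hpos : cs.length ≠ 0 := by simpa using hne
    have hlen : 32 < cs.length := by omega
    have hsplit : cs = cs.take 32 ++ cs.drop 32 := (List.take_append_drop 32 cs).symm
    have hlt : (cs.take 32).length = 32 := by simp; omega
    conv_lhs => rw [hsplit]
    rw [PySem.List.enumerate_append, List.foldl_append, hlt]
    rw [chunkFold1 sep (cs.take 32) j acc (by intro h; rw [h] at hlt; simp at hlt) (by omega)]
    have hcast : ((32 * j : Nat) : Int) + (32 : Nat) = ((32 * (j + 1) : Nat) : Int) := by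
      push_cast; ring
    rw [hcast]
    have hne' : cs.drop 32 ≠ [] := by
      intro h
      have : (cs.drop 32).length = 0 := by rw [h]; rfl
      simp at this; omega
    have hm' : ((cs.drop 32).length - 1) / 32 = m' := by simp; omega
    rw [ih (cs.drop 32) (j + 1) _ hne' hm']
    rw [if_neg (by omega : ¬ j + 1 = 0)]
    -- reindex the chunks of cs.drop 32 as the tail chunks of cs
    have hmap : (List.range (m' + 1)).map ((fun k => (cs.drop (32 * k)).take 32) ∘ Nat.succ)
        = (List.range (m' + 1)).map (fun k => ((cs.drop 32).drop (32 * k)).take 32) := by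
      apply List.map_congr_left
      intro k _
      simp only [Function.comp_apply]
      rw [List.drop_drop, show 32 + 32 * k = 32 * k.succ by omega]
    conv_rhs => rw [List.range_succ_eq_map, List.map_cons, List.map_map, hmap]
    rw [join_cons_of_ne_nil _ _ _ (by simp)]
    simp [Nat.mul_zero, List.append_assoc]

-- Core for A: A's per-row fold (separator after every non-last row, `tail` after the last)
-- equals the separator-join of the 32-chunks, for a nonempty list with m+1 chunks.
lemma chunk_fold_join (sep tail : List Char) :
    ∀ (m : Nat) (cs acc : List Char), cs ≠ [] → (cs.length - 1) / 32 = m →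
    (List.range (m + 1)).foldl
        (fun p r => if r ≠ m then p ++ (cs.drop (32 * r)).take 32 ++ sep
                    else p ++ cs.drop (32 * r) ++ tail) acc
      = acc ++ PySem.Chars.join sep ((List.range (m + 1)).map (fun k => (cs.drop (32 * k)).take 32))
          ++ tail := by
  intro m
  induction m with
  | zero =>
    intro cs acc hne hm
    have hpos : cs.length ≠ 0 := by simpa using hne
    have hlen : cs.length ≤ 32 := by omega
    simp [List.range_one, PySem.Chars.join_singleton, List.take_of_length_le hlen,
      List.append_assoc]
  | succ m' ih =>
    intro cs acc hne hm
    have hpos : cs.length ≠ 0 := by simpa using hne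
    have hlen : 32 < cs.length := by omega
    have hlen' : (cs.drop 32).length = cs.length - 32 := by simp
    have hne' : cs.drop 32 ≠ [] := by
      intro h; rw [h] at hlen'; simp at hlen'; omega
    have hm' : ((cs.drop 32).length - 1) / 32 = m' := by omega
    rw [List.range_succ_eq_map, List.foldl_cons, List.foldl_map]
    have hbody : (fun (p : List Char) (r : Nat) =>
          if r.succ ≠ m' + 1 then p ++ (cs.drop (32 * r.succ)).take 32 ++ sep
          else p ++ cs.drop (32 * r.succ) ++ tail)
        = (fun p r => if r ≠ m' then p ++ ((cs.drop 32).drop (32 * r)).take 32 ++ sep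
                      else p ++ (cs.drop 32).drop (32 * r) ++ tail) := by
      funext p r
      have hd : cs.drop (32 * r.succ) = (cs.drop 32).drop (32 * r) := by
        rw [List.drop_drop, show 32 + 32 * r = 32 * r.succ by omega]
      by_cases hr : r = m'
      · simp [hr]; omega
      · simp [hr, hd]
    rw [hbody]
    have h0 : (0 : Nat) ≠ m' + 1 := by omega
    simp only [h0, Nat.mul_zero, List.drop_zero, ne_eq, not_false_eq_true, if_true]
    rw [ih (cs.drop 32) (acc ++ List.take 32 cs ++ sep) hne' hm']
    rw [List.map_cons, List.map_map]
    have hmap : (List.range (m' + 1)).map ((fun k => (cs.drop (32 * k)).take 32) ∘ Nat.succ)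
        = (List.range (m' + 1)).map (fun k => ((cs.drop 32).drop (32 * k)).take 32) := by
      apply List.map_congr_left
      intro k _
      simp only [Function.comp_apply]
      rw [List.drop_drop, show 32 + 32 * k = 32 * k.succ by omega]
    rw [hmap]
    simp only [Nat.mul_zero, List.drop_zero]
    rw [join_cons_of_ne_nil]
    · simp [List.append_assoc]
    · simp

-- ===== VERDICT (by name: the statement is the Claim_ definition above) =====
theorem pretty_hex_spec : Claim_equal_pretty_hex := by
  intro hex_str indent _hdom hpre
  have hpre' : hex_str.toList.length % 2 = 0 := hpre
  unfold Spec_pretty_hex pretty_hex pretty_hex_alt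
  simp only [PySem.Str.len_eq]
  have h2 : ¬ PySem.Int.mod (hex_str.toList.length : Int) 2 = 1 := by
    rw [PySem.Int.mod_eq_emod_of_pos (by norm_num)]
    omega
  rw [if_neg h2, if_neg h2]
  set sep : List Char := '\n' :: PySem.List.pyRepeat [' '] (indent + 2) with hsep
  by_cases hN0 : hex_str.toList.length = 0
  · rw [if_pos (by exact_mod_cast hN0)]
    have hnil : hex_str.toList = [] := List.eq_nil_of_length_eq_zero hN0
    rw [hnil]
    simp [PySem.List.enumerate_nil]
  · have hNpos : 0 < hex_str.toList.length := Nat.pos_of_ne_zero hN0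
    rw [if_neg (show ¬((hex_str.toList.length : Int) = 0) by exact_mod_cast hN0)]
    set m : Nat := (hex_str.toList.length - 1) / 32 with hm
    -- A's last_row is m
    have hlr : PySem.Int.floordiv ((hex_str.toList.length : Int) - 1) 32 = (m : Int) := by
      rw [show ((hex_str.toList.length : Int) - 1) = ((hex_str.toList.length - 1 : Nat) : Int) by omega,
          show (32 : Int) = ((32 : Nat) : Int) from rfl, PySem.Int.floordiv_natCast]
    simp only [hlr]
    -- A's range is range (m+1) cast to Int
    have hrangeA : PySem.List.pyRange 0 ((m : Int) + 1) 1
        = List.map (fun k : Nat => (k : Int)) (List.range (m + 1)) := by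
      rw [show ((m : Int) + 1) = ((m + 1 : Nat) : Int) by push_cast; ring]
      exact PySem.List.pyRange_zero_natCast (m + 1)
    rw [hrangeA, List.foldl_map]
    -- A's body over Nat indices
    have hbodyA : (fun (p : List Char) (r : Nat) =>
          if (r : Int) ≠ (m : Int) then
            p ++ PySem.List.slice hex_str.toList (some ((r : Int) * 32)) (some ((r : Int) * 32 + 32)) ++ sep
          else p ++ PySem.List.slice hex_str.toList (some ((r : Int) * 32)) none ++ ['\''])
        = (fun p r => if r ≠ m then p ++ (hex_str.toList.drop (32 * r)).take 32 ++ sep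
                      else p ++ hex_str.toList.drop (32 * r) ++ ['\'']) := by
      funext p r
      have e1 : ((r : Int) * 32) = ((32 * r : Nat) : Int) := by push_cast; ring
      have e2 : ((r : Int) * 32 + 32) = ((32 * r : Nat) : Int) + ((32 : Nat) : Int) := by
        push_cast; ring
      have hsl : PySem.List.slice hex_str.toList (some ((r : Int) * 32)) (some ((r : Int) * 32 + 32))
          = (hex_str.toList.drop (32 * r)).take 32 := by
        rw [e2, e1, PySem.List.slice_natCast_add]
      have hsl2 : PySem.List.slice hex_str.toList (some ((r : Int) * 32)) none
          = hex_str.toList.drop (32 * r) := by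
        rw [e1, PySem.List.slice_from_natCast]
      by_cases hr : r = m
      · subst hr; simp [hsl2]
      · simp [hr, hsl]
    rw [hbodyA]
    have hnil : hex_str.toList ≠ [] := by
      intro h; rw [h] at hN0; simp at hN0
    rw [chunk_fold_join sep ['\''] m hex_str.toList _ hnil rfl]
    -- B's character pass produces the same chunk join, then the closing quote
    have hB := charFold sep m hex_str.toList 0 "h'".toList hnil rfl
    simp only [Nat.mul_zero, Int.natCast_zero] at hB
    have hBfold : (PySem.List.enumerate hex_str.toList 0).foldl
        (fun out ic => (if ic.1 ≠ 0 ∧ PySem.Int.mod ic.1 32 = 0 then out ++ sep else out) ++ [ic.2])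
        "h'".toList
        = "h'".toList ++ PySem.Chars.join sep
            ((List.range (m + 1)).map (fun k => (hex_str.toList.drop (32 * k)).take 32)) := by
      have : (fun (out : List Char) (ic : Int × Char) =>
          (if ic.1 ≠ 0 ∧ PySem.Int.mod ic.1 32 = 0 then out ++ sep else out) ++ [ic.2])
          = pvBody sep := by funext out ic; rfl
      rw [this, hB]
      simp
    rw [hBfold]
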